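-- pv_equiv track=rewrite | github.com/chrisjdavie/hackerrank | datastructures/queues/down_to_zero/passed_not_queues/play.py | setup_struct
-- ===== SOURCE A (Python) =====
-- def setup_struct(values_missing):
--
--     targ_max = max(values_missing)
--     next_val = [ targ_max + 2 ]*(targ_max + 2)
--
--     next_val[0] = 0
--     next_val[1] = 1
--     next_val[2] = 2
--
--     for i in range(2, targ_max):
--         moves = next_val[i] + 1
--         if next_val[i + 1] > moves:
--             next_val[i + 1] = moves
--         for j in range(2, min(i + 1, targ_max//i + 1)):
--             if next_val[j*i] > moves:
--                 next_val[j*i] = moves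
--
--     return next_val
-- ===== SOURCE B (Python) =====
-- def setup_struct(values_missing):
--     targ_max = max(values_missing)
--     next_val = [targ_max + 2] * (targ_max + 2)
--
--     next_val[0] = 0
--     next_val[1] = 1
--     next_val[2] = 2
--
--     # pull-based DP, block by block: for each block a sieve collects every n's
--     # divisors d with 2 <= d and d*d <= n, then each entry is computed once from
--     # the already-final smaller entries (no forward pushing, block-local memory)
--     s = 1
--     while (s + 1) * (s + 1) <= targ_max:
--         s = s + 1
--
--     for lo in range(3, targ_max + 1, 65536):
--         hi = min(lo + 65536, targ_max + 1)
--         divs = [[] for _ in range(hi - lo)]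
--         for d in range(2, s + 1):
--             start = d * d
--             if start < lo:
--                 start = ((lo + d - 1) // d) * d
--             for m in range(start, hi, d):
--                 divs[m - lo].append(d)
--         for n in range(lo, hi):
--             best = next_val[n - 1] + 1
--             for d in divs[n - lo]:
--                 cand = next_val[n // d] + 1
--                 if cand < best:
--                     best = cand
--             next_val[n] = best
--
--     return next_val
-- ===== Notes on version B (the rewrite author's own statement) =====
-- stated objective: alternative
-- what changed: Replaces the push-based DP (each source i propagates next_val[i]+1 forward to i+1 and its multiples) by a pull-based DP: a sieve first collects each n's divisors d with 2<=d and d*d<=n, then every entry is computed once as 1 + min over its predecessor and those divisor pairs.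
import Mathlib
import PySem

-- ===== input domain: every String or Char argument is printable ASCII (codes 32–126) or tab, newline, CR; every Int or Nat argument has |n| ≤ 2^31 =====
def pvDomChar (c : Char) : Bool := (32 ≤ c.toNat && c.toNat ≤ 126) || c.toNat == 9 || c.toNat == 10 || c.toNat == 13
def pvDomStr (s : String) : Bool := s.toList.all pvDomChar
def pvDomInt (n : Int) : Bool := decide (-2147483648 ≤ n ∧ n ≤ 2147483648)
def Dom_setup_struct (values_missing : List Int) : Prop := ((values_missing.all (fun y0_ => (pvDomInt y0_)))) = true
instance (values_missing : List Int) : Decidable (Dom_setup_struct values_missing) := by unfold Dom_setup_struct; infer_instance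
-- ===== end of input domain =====

-- B replaces A's push-based DP (propagating next_val[i]+1 to i+1 and multiples) by a
-- pull-based DP computing each entry once from its predecessor and divisor pairs (alternative decomposition, not faster).

-- ===== PORT A =====
-- body of A after `targ_max = max(values_missing)` (helper so the lemmas can talk about it)
def setup_struct_core (targ_max : Int) : List Int :=
  let next_val := List.replicate (targ_max + 2).toNat (targ_max + 2)
  let next_val := PySem.List.pySetD next_val 0 0   -- in range under Pre_ (targ_max ≥ 1)
  let next_val := PySem.List.pySetD next_val 1 1
  let next_val := PySem.List.pySetD next_val 2 2
  (PySem.List.pyRange 2 targ_max 1).foldl (fun next_val i =>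
    let moves := PySem.List.pyGetD next_val i 0 + 1
    let next_val :=
      if PySem.List.pyGetD next_val (i + 1) 0 > moves then
        PySem.List.pySetD next_val (i + 1) moves
      else next_val
    (PySem.List.pyRange 2 (min (i + 1) (PySem.Int.floordiv targ_max i + 1)) 1).foldl
      (fun next_val j =>
        if PySem.List.pyGetD next_val (j * i) 0 > moves then
          PySem.List.pySetD next_val (j * i) moves
        else next_val) next_val) next_val

def setup_struct (values_missing : List Int) : List Int :=
  match PySem.List.max? values_missing (fun x => x) with
  | none => []   -- max([]) raises ValueError: excluded by Pre_
  | some targ_max => setup_struct_core targ_max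

-- ===== PORT B =====
-- port of B's `s = 1; while (s+1)*(s+1) <= targ_max: s += 1` (isqrt by counting up)
def isqrtGo (tm s : Int) : Int :=
  if h : (s + 1) * (s + 1) ≤ tm then isqrtGo tm (s + 1) else s
termination_by (tm - s).toNat
decreasing_by
  have hkey : s < tm := by nlinarith [mul_self_nonneg (s + 1)]
  omega

-- body of B after `targ_max = max(values_missing)`
def setup_struct_alt_core (targ_max : Int) : List Int :=
  let next_val := List.replicate (targ_max + 2).toNat (targ_max + 2)
  let next_val := PySem.List.pySetD next_val 0 0   -- in range under Pre_ (targ_max ≥ 1)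
  let next_val := PySem.List.pySetD next_val 1 1
  let next_val := PySem.List.pySetD next_val 2 2
  let s := isqrtGo targ_max 1
  -- divs[m - lo].append(d) is ported as get-append-set (exact: same list value)
  (PySem.List.pyRange 3 (targ_max + 1) 65536).foldl
    (fun next_val lo =>
      let hi := min (lo + 65536) (targ_max + 1)
      let divs := (PySem.List.pyRange 2 (s + 1) 1).foldl
        (fun divs d =>
          let start := d * d
          let start := if start < lo then PySem.Int.floordiv (lo + d - 1) d * d else start
          (PySem.List.pyRange start hi d).foldl
            (fun divs m =>
              PySem.List.pySetD divs (m - lo) (PySem.List.pyGetD divs (m - lo) [] ++ [d])) divs)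
        (List.replicate (hi - lo).toNat [])
      (PySem.List.pyRange lo hi 1).foldl
        (fun next_val n =>
          let best := PySem.List.pyGetD next_val (n - 1) 0 + 1
          let best := (PySem.List.pyGetD divs (n - lo) []).foldl (fun best d =>
            let cand := PySem.List.pyGetD next_val (PySem.Int.floordiv n d) 0 + 1
            if cand < best then cand else best) best
          PySem.List.pySetD next_val n best) next_val)
    next_val

def setup_struct_alt (values_missing : List Int) : List Int :=
  match PySem.List.max? values_missing (fun x => x) with
  | none => []   -- max([]) raises ValueError: excluded by Pre_
  | some targ_max => setup_struct_alt_core targ_max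

-- ===== PRECONDITION & SPEC =====
-- Pre_ excludes empty input (max([]) raises ValueError) and inputs whose maximum is ≤ 0
-- (the writes next_val[0]/[1]/[2] then raise IndexError); exactly on nonempty lists with max ≥ 1 A returns.
def Pre_setup_struct (values_missing : List Int) : Prop :=
  values_missing ≠ [] ∧ ∃ x ∈ values_missing, 1 ≤ x
instance (values_missing : List Int) : Decidable (Pre_setup_struct values_missing) := by
  unfold Pre_setup_struct; infer_instance
def pvWitness_setup_struct : List Int := [7]

def Spec_setup_struct (values_missing : List Int) (out : List Int) : Prop := out = setup_struct_alt values_missing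
instance (values_missing : List Int) (out : List Int) : Decidable (Spec_setup_struct values_missing out) := by unfold Spec_setup_struct; infer_instance

-- ===== CLAIM (what is proved, stated in full; the proofs are below) =====
def Claim_equal_setup_struct : Prop := ∀ (values_missing : List Int), Dom_setup_struct values_missing → Pre_setup_struct values_missing → Spec_setup_struct values_missing (setup_struct values_missing)

-- ===== LEMMAS AND PROOFS =====

-- the min-moves value V k (defined by B's pull recurrence)
def V : Nat → Int
  | 0 => 0
  | 1 => 1
  | 2 => 2
  | n + 3 =>
    (List.range' 2 (n + 1)).attach.foldl
      (fun b x =>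
        if (n + 3) % x.1 = 0 ∧ x.1 * x.1 ≤ n + 3 then
          if V ((n + 3) / x.1) + 1 < b then V ((n + 3) / x.1) + 1 else b
        else b)
      (V (n + 2) + 1)
decreasing_by
  all_goals first
    | (have hx := x.2; rw [List.mem_range'_1] at hx; exact Nat.div_lt_self (by omega) (by omega))
    | omega

theorem V_succ (n : Nat) :
    V (n + 3) =
      (List.range' 2 (n + 1)).foldl
        (fun b d =>
          if (n + 3) % d = 0 ∧ d * d ≤ n + 3 then
            if V ((n + 3) / d) + 1 < b then V ((n + 3) / d) + 1 else b
          else b)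
        (V (n + 2) + 1) := by
  rw [V]
  exact List.foldl_attach
    (f := fun b d =>
      if (n + 3) % d = 0 ∧ d * d ≤ n + 3 then
        if V ((n + 3) / d) + 1 < b then V ((n + 3) / d) + 1 else b
      else b)
    (l := List.range' 2 (n + 1)) (b := V (n + 2) + 1)

theorem V_zero : V 0 = 0 := by rw [V]
theorem V_one : V 1 = 1 := by rw [V]
theorem V_two : V 2 = 2 := by rw [V]


-- ---------- generic min-fold toolkit ----------

theorem foldl_min_le_init (l : List Int) (init : Int) : l.foldl min init ≤ init := by
  induction l generalizing init with
  | nil => simp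
  | cons x t ih => exact le_trans (ih (min init x)) (min_le_left _ _)

theorem foldl_min_le_mem (l : List Int) (init y : Int) (h : y ∈ l) : l.foldl min init ≤ y := by
  induction l generalizing init with
  | nil => simp at h
  | cons x t ih =>
    rcases List.mem_cons.mp h with rfl | hy
    · exact le_trans (foldl_min_le_init t (min init y)) (min_le_right _ _)
    · exact ih (min init x) hy

theorem le_foldl_min (l : List Int) (init c : Int) (h1 : c ≤ init) (h2 : ∀ y ∈ l, c ≤ y) :
    c ≤ l.foldl min init := by
  induction l generalizing init with
  | nil => simpa using h1
  | cons x t ih =>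
    exact ih (min init x) (le_min h1 (h2 x (List.mem_cons_self))) (fun y hy => h2 y (List.mem_cons_of_mem _ hy))

theorem ite_lt_eq_min (b c : Int) : (if c < b then c else b) = min b c := by
  rw [min_def]; split_ifs <;> omega

theorem foldl_ite_min_min {α : Type} (p : α → Prop) [DecidablePred p] (f : α → Int)
    (l : List α) (init : Int) :
    l.foldl (fun b d => if p d then min b (f d) else b) init
      = ((l.filter (fun d => decide (p d))).map f).foldl min init := by
  induction l generalizing init with
  | nil => rfl
  | cons x t ih =>
    by_cases hp : p x
    · simp only [List.foldl_cons, List.filter_cons, hp, decide_true, if_true,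
        List.map_cons]
      exact ih (min init (f x))
    · simp only [List.foldl_cons, List.filter_cons, hp, decide_false, if_false,
        Bool.false_eq_true]
      exact ih init

theorem foldl_ite_min {α : Type} (p : α → Prop) [DecidablePred p] (f : α → Int)
    (l : List α) (init : Int) :
    l.foldl (fun b d => if p d then (if f d < b then f d else b) else b) init
      = ((l.filter (fun d => decide (p d))).map f).foldl min init := by
  rw [PySem.List.foldl_congr_mem _ _ (fun b d => if p d then min b (f d) else b) _
    (by intro b x _; by_cases hp : p x <;> simp [hp, ite_lt_eq_min])]
  exact foldl_ite_min_min p f l init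

-- ---------- the table abstraction ----------

def tab {α : Type} (L : Nat) (f : Nat → α) : List α := (List.range L).map f

theorem tab_getD {α : Type} (L : Nat) (f : Nat → α) (k : Nat) (dflt : α) (h : k < L) :
    (tab L f).getD k dflt = f k := by
  rw [List.getD_eq_getElem?_getD]
  simp [tab, List.getElem?_map, List.getElem?_range h]

theorem tab_set {α : Type} (L : Nat) (f : Nat → α) (n : Nat) (v : α) (_h : n < L) :
    (tab L f).set n v = tab L (fun k => if k = n then v else f k) := by
  apply List.ext_getElem
  · simp [tab]
  · intro k h1 h2
    rw [List.getElem_set]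
    simp only [tab, List.getElem_map, List.getElem_range]
    rcases eq_or_ne k n with rfl | hne
    · simp
    · rw [if_neg (Ne.symm hne), if_neg hne]

theorem tab_congr {α : Type} (L : Nat) (f g : Nat → α) (h : ∀ k, k < L → f k = g k) :
    tab L f = tab L g := by
  apply List.ext_getElem
  · simp [tab]
  · intro k h1 h2
    simp only [tab, List.getElem_map, List.getElem_range]
    exact h k (by simpa [tab] using h1)

theorem replicate_tab {α : Type} (L : Nat) (c : α) : List.replicate L c = tab L (fun _ => c) := by
  simp [tab]

-- ---------- candidate sources and partial minima ----------

-- src k t: source t pushes the candidate V t + 1 into target k (A's update rules)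
def src (k t : Nat) : Bool :=
  (k == t + 1) || (k % t == 0 && decide (2 ≤ k / t) && decide (k / t ≤ t))

-- partial minimum at target k after all sources t < s have pushed (init = sentinel M+2)
def pm (M s k : Nat) : Int :=
  (((List.range s).filter (src k)).map (fun t => V t + 1)).foldl min ((M : Int) + 2)

theorem foldl_min_le_init_shape (n : Nat) :
    (List.range' 2 (n + 1)).foldl
        (fun b d =>
          if (n + 3) % d = 0 ∧ d * d ≤ n + 3 then
            if V ((n + 3) / d) + 1 < b then V ((n + 3) / d) + 1 else b
          else b)
        (V (n + 2) + 1) ≤ V (n + 2) + 1 := by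
  rw [foldl_ite_min (fun d => (n + 3) % d = 0 ∧ d * d ≤ n + 3) (fun d => V ((n + 3) / d) + 1)]
  exact foldl_min_le_init _ _

theorem V_le (k : Nat) : V k ≤ k := by
  induction k using Nat.strong_induction_on with
  | _ k ih =>
    match k with
    | 0 => simp [V_zero]
    | 1 => simp [V_one]
    | 2 => simp [V_two]
    | n + 3 =>
      rw [V_succ]
      calc _ ≤ V (n + 2) + 1 := foldl_min_le_init_shape n
        _ ≤ (n + 2 : Int) + 1 := by have := ih (n + 2) (by omega); omega
        _ = ((n + 3 : Nat) : Int) := by push_cast; ring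

theorem pm_two (M k : Nat) (h : 3 ≤ k) : pm M 2 k = (M : Int) + 2 := by
  have h0 : src k 0 = false := by
    simp only [src, Bool.or_eq_false_iff, Bool.and_eq_false_iff]
    refine ⟨by simp; omega, Or.inl (Or.inl ?_)⟩
    simp [Nat.mod_zero]; omega
  have h1 : src k 1 = false := by
    simp only [src, Bool.or_eq_false_iff, Bool.and_eq_false_iff]
    refine ⟨by simp; omega, Or.inr ?_⟩
    simp [Nat.div_one]; omega
  have h2 : List.range 2 = [0, 1] := by decide
  simp [pm, h2, h0, h1]

theorem pm_succ (M s k : Nat) :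
    pm M (s + 1) k = if src k s then min (pm M s k) (V s + 1) else pm M s k := by
  simp only [pm, List.range_succ, List.filter_append, List.map_append, List.foldl_append]
  by_cases h : src k s
  · simp [h]
  · simp [h]

-- the full partial minimum (all sources < k) is V k
theorem pm_full (M k : Nat) (h3 : 3 ≤ k) (hkM : k ≤ M) : pm M k k = V k := by
  obtain ⟨n, rfl⟩ : ∃ n, k = n + 3 := ⟨k - 3, by omega⟩
  have hV : V (n + 3) =
      ((((List.range' 2 (n + 1)).filter
          (fun d => decide ((n + 3) % d = 0 ∧ d * d ≤ n + 3))).map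
          (fun d => V ((n + 3) / d) + 1)).foldl min (V (n + 2) + 1)) := by
    rw [V_succ, foldl_ite_min (fun d => (n + 3) % d = 0 ∧ d * d ≤ n + 3)
      (fun d => V ((n + 3) / d) + 1)]
  apply le_antisymm
  · -- pm ≤ V : every candidate of V's fold is dominated by pm
    rw [hV]
    apply le_foldl_min
    · -- pm ≤ V (n+2) + 1  (the predecessor candidate is in pm's list)
      apply foldl_min_le_mem
      simp only [List.mem_map, List.mem_filter]
      refine ⟨n + 2, ⟨List.mem_range.mpr (by omega), ?_⟩, rfl⟩
      simp [src]
    · intro y hy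
      simp only [List.mem_map, List.mem_filter, List.mem_range'_1, decide_eq_true_eq] at hy
      obtain ⟨d, ⟨⟨hd2, hdlt⟩, hdvd, hdsq⟩, rfl⟩ := hy
      have hdd : d ∣ n + 3 := Nat.dvd_of_mod_eq_zero hdvd
      have ht : (n + 3) / ((n + 3) / d) = d := Nat.div_div_self hdd (by omega)
      apply foldl_min_le_mem
      simp only [List.mem_map, List.mem_filter]
      refine ⟨(n + 3) / d, ⟨List.mem_range.mpr (Nat.div_lt_self (by omega) (by omega)), ?_⟩, rfl⟩
      simp only [src, Bool.or_eq_true, Bool.and_eq_true, beq_iff_eq, decide_eq_true_eq]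
      right
      refine ⟨⟨?_, ?_⟩, ?_⟩
      · exact Nat.mod_eq_zero_of_dvd (Nat.div_dvd_of_dvd hdd)
      · rw [ht]; exact hd2
      · rw [ht]; exact (Nat.le_div_iff_mul_le (by omega)).mpr hdsq
  · -- V ≤ pm : every candidate of pm is dominated by V's fold
    apply le_foldl_min
    · have := V_le (n + 3)
      have h2 : ((n + 3 : Nat) : Int) ≤ (M : Int) := by exact_mod_cast hkM
      omega
    · intro y hy
      simp only [List.mem_map, List.mem_filter] at hy
      obtain ⟨t, ⟨htr, hsrc⟩, rfl⟩ := hy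
      have htlt : t < n + 3 := List.mem_range.mp htr
      simp only [src, Bool.or_eq_true, beq_iff_eq, Bool.and_eq_true, decide_eq_true_eq] at hsrc
      rcases hsrc with h1 | ⟨⟨hmod, h2⟩, h3'⟩
      · -- t = k - 1 : this is the init of V's fold
        have : t = n + 2 := by omega
        subst this
        rw [hV]; exact foldl_min_le_init _ _
      · -- divisor source: V's fold contains the candidate at d = k / t
        have htdvd : t ∣ n + 3 := Nat.dvd_of_mod_eq_zero hmod
        have ht2 : 2 ≤ t := le_trans h2 h3'
        have hdlt : (n + 3) / t < n + 3 := Nat.div_lt_self (by omega) (by omega)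
        have hdt : (n + 3) / t * t = n + 3 := Nat.div_mul_cancel htdvd
        rw [hV]
        apply foldl_min_le_mem
        simp only [List.mem_map, List.mem_filter, List.mem_range'_1, decide_eq_true_eq]
        refine ⟨(n + 3) / t, ⟨⟨h2, by omega⟩, ?_, ?_⟩, ?_⟩
        · exact Nat.mod_eq_zero_of_dvd (Nat.div_dvd_of_dvd htdvd)
        · calc (n + 3) / t * ((n + 3) / t) ≤ (n + 3) / t * t := Nat.mul_le_mul_left _ h3'
            _ = n + 3 := hdt
        · rw [Nat.div_div_self htdvd (by omega)]


-- ---------- state functions of the two loops ----------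

def f0 (M : Nat) : Nat → Int := fun k =>
  if k = 2 then 2 else if k = 1 then 1 else if k = 0 then 0 else (M : Int) + 2

-- A's state after all sources t < i have pushed
def FA (M i : Nat) : Nat → Int := fun k =>
  if k ≤ i then V k else if k ≤ M then pm M i k else (M : Int) + 2

-- B's state after all targets k ≤ t have been computed
def FB (M t : Nat) : Nat → Int := fun k => if k ≤ t then V k else (M : Int) + 2

-- the initialised array of both programs
def init0 (targ_max : Int) : List Int :=
  PySem.List.pySetD (PySem.List.pySetD (PySem.List.pySetD
    (List.replicate (targ_max + 2).toNat (targ_max + 2)) 0 0) 1 1) 2 2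

-- one iteration of A's outer loop
def stepA (targ_max : Int) (next_val : List Int) (i : Int) : List Int :=
  let moves := PySem.List.pyGetD next_val i 0 + 1
  let next_val :=
    if PySem.List.pyGetD next_val (i + 1) 0 > moves then
      PySem.List.pySetD next_val (i + 1) moves
    else next_val
  (PySem.List.pyRange 2 (min (i + 1) (PySem.Int.floordiv targ_max i + 1)) 1).foldl
    (fun next_val j =>
      if PySem.List.pyGetD next_val (j * i) 0 > moves then
        PySem.List.pySetD next_val (j * i) moves
      else next_val) next_val

theorem coreA_as_fold (targ_max : Int) :
    setup_struct_core targ_max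
      = (PySem.List.pyRange 2 targ_max 1).foldl (stepA targ_max) (init0 targ_max) := rfl

theorem init0_tab (M : Nat) (h : 1 ≤ M) : init0 ((M : Int)) = tab (M + 2) (f0 M) := by
  unfold init0
  rw [show ((M : Int) + 2).toNat = M + 2 from by omega, replicate_tab]
  rw [show (0 : Int) = ((0 : Nat) : Int) from by norm_num, PySem.List.pySetD_natCast]
  rw [tab_set _ _ _ _ (by omega)]
  rw [show (1 : Int) = ((1 : Nat) : Int) from by norm_num, PySem.List.pySetD_natCast]
  rw [tab_set _ _ _ _ (by omega)]
  rw [show (2 : Int) = ((2 : Nat) : Int) from by norm_num, PySem.List.pySetD_natCast]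
  rw [tab_set _ _ _ _ (by omega)]
  apply tab_congr
  intro k _
  unfold f0
  split_ifs <;> omega

theorem foldl_pyRange_natCast {σ : Type} (f : σ → Int → σ) (st : σ) (a : Nat) (B : Int) :
    (PySem.List.pyRange (a : Int) B 1).foldl f st
      = (List.range' a (B - (a : Int)).toNat).foldl (fun s j => f s ((j : Nat) : Int)) st := by
  rw [PySem.List.pyRange_one, List.foldl_map, List.range'_eq_map_range, List.foldl_map]
  apply PySem.List.foldl_congr_mem
  intro acc x _
  rw [Nat.cast_add]

theorem foldl_pyRange_two {σ : Type} (f : σ → Int → σ) (st : σ) (B : Int) :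
    (PySem.List.pyRange 2 B 1).foldl f st
      = (List.range' 2 (B - 2).toNat).foldl (fun s j => f s ((j : Nat) : Int)) st := by
  simpa using foldl_pyRange_natCast f st 2 B

-- A's inner loop: each target j*i is lowered to min with moves
theorem innerA (M i : Nat) (mv : Int) (J : List Nat) :
    ∀ (g : Nat → Int), (∀ j ∈ J, j * i < M + 2) →
    J.foldl (fun st (j : Nat) =>
        if PySem.List.pyGetD st ((j : Int) * (i : Int)) 0 > mv then
          PySem.List.pySetD st ((j : Int) * (i : Int)) mv
        else st) (tab (M + 2) g)
      = tab (M + 2) (fun k => if ∃ j ∈ J, k = j * i then min (g k) mv else g k) := by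
  induction J with
  | nil =>
    intro g _
    exact tab_congr _ _ _ (fun k _ => by simp)
  | cons j J ih =>
    intro g hr
    have hj : j * i < M + 2 := hr j List.mem_cons_self
    rw [List.foldl_cons]
    have hcast : (j : Int) * (i : Int) = ((j * i : Nat) : Int) := by push_cast; ring
    have hstep :
        (if PySem.List.pyGetD (tab (M + 2) g) ((j : Int) * (i : Int)) 0 > mv then
            PySem.List.pySetD (tab (M + 2) g) ((j : Int) * (i : Int)) mv
          else tab (M + 2) g)
          = tab (M + 2) (fun k => if k = j * i then min (g k) mv else g k) := by
      rw [hcast, PySem.List.pyGetD_natCast, tab_getD _ _ _ _ hj]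
      by_cases hgt : g (j * i) > mv
      · rw [if_pos hgt, PySem.List.pySetD_natCast, tab_set _ _ _ _ hj]
        apply tab_congr; intro k _
        rcases eq_or_ne k (j * i) with rfl | hne
        · rw [if_pos rfl, if_pos rfl]; omega
        · rw [if_neg hne, if_neg hne]
      · rw [if_neg hgt]
        apply tab_congr; intro k _
        rcases eq_or_ne k (j * i) with rfl | hne
        · rw [if_pos rfl]; omega
        · rw [if_neg hne]
    rw [hstep, ih _ (fun j' hj' => hr j' (List.mem_cons_of_mem _ hj'))]
    apply tab_congr; intro k _
    by_cases hkc : ∃ j' ∈ j :: J, k = j' * i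
    · rw [if_pos hkc]
      by_cases hk : ∃ j' ∈ J, k = j' * i
      · rw [if_pos hk]
        by_cases hne : k = j * i
        · rw [if_pos hne]; omega
        · rw [if_neg hne]
      · have hkj : k = j * i := by
          obtain ⟨j', hm, rfl⟩ := hkc
          rcases List.mem_cons.mp hm with rfl | hm'
          · rfl
          · exact absurd ⟨j', hm', rfl⟩ hk
        rw [if_neg hk, if_pos hkj]
    · rw [if_neg hkc, if_neg (by rintro ⟨j', hm', he⟩; exact hkc ⟨j', List.mem_cons_of_mem _ hm', he⟩)]
      have hne : k ≠ j * i := fun he => hkc ⟨j, List.mem_cons_self, he⟩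
      rw [if_neg hne]

theorem stepA_eq (M i : Nat) (h2 : 2 ≤ i) (hiM : i < M) :
    stepA ((M : Int)) (tab (M + 2) (FA M i)) ((i : Int)) = tab (M + 2) (FA M (i + 1)) := by
  have hFAi : FA M i i = V i := by simp [FA]
  have hold : FA M i (i + 1) = pm M i (i + 1) := by
    unfold FA; rw [if_neg (by omega), if_pos (by omega)]
  have hsrc1 : src (i + 1) i = true := by simp [src]
  have hfin : min (pm M i (i + 1)) (V i + 1) = V (i + 1) := by
    have h := pm_succ M i (i + 1)
    simp only [hsrc1, if_true] at h
    rw [← h]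
    exact pm_full M (i + 1) (by omega) (by omega)
  simp only [stepA]
  rw [show ((i : Int)) + 1 = ((i + 1 : Nat) : Int) from by push_cast; ring]
  simp only [PySem.List.pyGetD_natCast]
  rw [tab_getD (M + 2) (FA M i) i 0 (by omega), tab_getD (M + 2) (FA M i) (i + 1) 0 (by omega),
    hFAi, hold]
  rw [PySem.Int.floordiv_natCast]
  rw [show min (((i + 1 : Nat)) : Int) (((M / i : Nat) : Int) + 1)
      = ((min (i + 1) (M / i + 1) : Nat) : Int) from by push_cast; omega]
  have hupd :
      (if pm M i (i + 1) > V i + 1 then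
          PySem.List.pySetD (tab (M + 2) (FA M i)) (((i + 1 : Nat)) : Int) (V i + 1)
        else tab (M + 2) (FA M i))
        = tab (M + 2) (fun k => if k = i + 1 then V (i + 1) else FA M i k) := by
    by_cases hgt : pm M i (i + 1) > V i + 1
    · rw [if_pos hgt, PySem.List.pySetD_natCast, tab_set _ _ _ _ (by omega)]
      apply tab_congr; intro k _
      by_cases hke : k = i + 1
      · rw [if_pos hke, if_pos hke]; subst hke; rw [← hfin]; omega
      · rw [if_neg hke, if_neg hke]
    · rw [if_neg hgt]
      apply tab_congr; intro k _
      by_cases hke : k = i + 1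
      · rw [if_pos hke]; subst hke; rw [← hfin, hold]; omega
      · rw [if_neg hke]
  rw [hupd, foldl_pyRange_two]
  rw [show ((((min (i + 1) (M / i + 1) : Nat)) : Int) - 2).toNat = min (i + 1) (M / i + 1) - 2
    from by omega]
  have hjbound : ∀ j ∈ List.range' 2 (min (i + 1) (M / i + 1) - 2), j * i < M + 2 := by
    intro j hj
    rw [List.mem_range'_1] at hj
    have hj2 : j ≤ M / i := by omega
    calc j * i ≤ (M / i) * i := Nat.mul_le_mul_right i hj2
      _ ≤ M := Nat.div_mul_le_self M i
      _ < M + 2 := by omega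
  rw [innerA M i (V i + 1) (List.range' 2 (min (i + 1) (M / i + 1) - 2))
    (fun k => if k = i + 1 then V (i + 1) else FA M i k) hjbound]
  apply tab_congr
  intro k hk
  by_cases hP : ∃ j ∈ List.range' 2 (min (i + 1) (M / i + 1) - 2), k = j * i
  · rw [if_pos hP]
    obtain ⟨j, hjm', rfl⟩ := hP
    rw [List.mem_range'_1] at hjm'
    have hji : j ≤ i := by omega
    have hjdiv : j ≤ M / i := by omega
    have hkM : j * i ≤ M := le_trans (Nat.mul_le_mul_right i hjdiv) (Nat.div_mul_le_self M i)
    have hik : i + 1 < j * i := by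
      have : 2 * i ≤ j * i := Nat.mul_le_mul_right i (by omega)
      omega
    rw [if_neg (by omega : ¬ j * i = i + 1)]
    have hGk : FA M i (j * i) = pm M i (j * i) := by
      unfold FA; rw [if_neg (by omega), if_pos hkM]
    rw [hGk]
    have hsrc2 : src (j * i) i = true := by
      simp only [src, Bool.or_eq_true, Bool.and_eq_true, beq_iff_eq, decide_eq_true_eq]
      right
      refine ⟨⟨?_, ?_⟩, ?_⟩
      · exact Nat.mul_mod_left j i
      · rw [Nat.mul_div_cancel _ (show 0 < i by omega)]; omega
      · rw [Nat.mul_div_cancel _ (show 0 < i by omega)]; exact hji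
    show min (pm M i (j * i)) (V i + 1) = FA M (i + 1) (j * i)
    unfold FA
    rw [if_neg (by omega), if_pos hkM, pm_succ, hsrc2, if_pos rfl]
  · rw [if_neg hP]
    by_cases hk1 : k ≤ i + 1
    · by_cases hke : k = i + 1
      · rw [if_pos hke]
        subst hke
        unfold FA
        rw [if_pos (le_refl _)]
      · rw [if_neg hke]
        unfold FA
        rw [if_pos (by omega), if_pos hk1]
    · rw [if_neg (by omega : ¬ k = i + 1)]
      by_cases hkM : k ≤ M
      · have hsrc0 : src k i = false := by
          rw [Bool.eq_false_iff]
          intro hcon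
          simp only [src, Bool.or_eq_true, Bool.and_eq_true, beq_iff_eq, decide_eq_true_eq] at hcon
          rcases hcon with hcon | ⟨⟨hmod, h2'⟩, h3'⟩
          · omega
          · have hdvd : i ∣ k := Nat.dvd_of_mod_eq_zero hmod
            have hkeq : k / i * i = k := Nat.div_mul_cancel hdvd
            apply hP
            refine ⟨k / i, ?_, hkeq.symm⟩
            rw [List.mem_range'_1]
            have hdivle : k / i ≤ M / i := Nat.div_le_div_right hkM
            have hMi : 1 ≤ M / i := (Nat.one_le_div_iff (by omega)).mpr (by omega)
            exact ⟨h2', by omega⟩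
        unfold FA
        rw [if_neg (by omega), if_pos hkM, if_neg (by omega), if_pos hkM, pm_succ, hsrc0,
          if_neg (by simp)]
      · unfold FA
        rw [if_neg (by omega), if_neg hkM, if_neg (by omega), if_neg hkM]

theorem loopA (M : Nat) (hM : 2 ≤ M) : ∀ (cnt i : Nat), 2 ≤ i → i + cnt = M →
    (List.range' i cnt).foldl (fun st j => stepA ((M : Int)) st ((j : Nat) : Int)) (tab (M + 2) (FA M i))
      = tab (M + 2) (FA M M) := by
  intro cnt
  induction cnt with
  | zero =>
    intro i h2 he
    obtain rfl : i = M := by omega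
    rfl
  | succ c ih =>
    intro i h2 he
    rw [List.range'_succ, List.foldl_cons, stepA_eq M i h2 (by omega)]
    exact ih (i + 1) (by omega) (by omega)

theorem coreA_eq (M : Nat) (hM : 2 ≤ M) :
    setup_struct_core ((M : Int)) = tab (M + 2) (FA M M) := by
  rw [coreA_as_fold, init0_tab M (by omega)]
  rw [show (2 : Int) = ((2 : Nat) : Int) from by norm_num, foldl_pyRange_natCast]
  rw [show (((M : Int)) - ((2 : Nat) : Int)).toNat = M - 2 from by omega]
  rw [tab_congr (M + 2) (f0 M) (FA M 2) (by
    intro k hk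
    unfold f0 FA
    rcases Nat.lt_or_ge k 3 with h | h
    · interval_cases k <;> simp [V_zero, V_one, V_two]
    · rw [if_neg (by omega), if_neg (by omega), if_neg (by omega), if_neg (by omega)]
      by_cases hkM : k ≤ M
      · rw [if_pos hkM, pm_two M k h]
      · rw [if_neg hkM])]
  exact loopA M hM (M - 2) 2 (le_refl 2) (by omega)

-- appending v at a list of pairwise-distinct indices
theorem sieve_upd (L : Nat) (v : Int) (T : List Nat) :
    ∀ (g : Nat → List Int), T.Nodup → (∀ t ∈ T, t < L) →
    T.foldl (fun divs (t : Nat) =>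
        PySem.List.pySetD divs ((t : Nat) : Int)
          (PySem.List.pyGetD divs ((t : Nat) : Int) [] ++ [v])) (tab L g)
      = tab L (fun k => if k ∈ T then g k ++ [v] else g k) := by
  induction T with
  | nil =>
    intro g _ _
    exact tab_congr _ _ _ (fun k _ => by simp)
  | cons t0 T' ih =>
    intro g hnd hb
    have ht0 : t0 < L := hb t0 List.mem_cons_self
    have ht0n : t0 ∉ T' := (List.nodup_cons.mp hnd).1
    rw [List.foldl_cons, PySem.List.pyGetD_natCast, tab_getD _ _ _ _ ht0,
      PySem.List.pySetD_natCast, tab_set _ _ _ _ ht0,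
      ih _ (List.nodup_cons.mp hnd).2 (fun t ht => hb t (List.mem_cons_of_mem _ ht))]
    apply tab_congr; intro k _
    by_cases hk' : k ∈ T'
    · rw [if_pos hk', if_pos (List.mem_cons_of_mem _ hk'),
        if_neg (by rintro rfl; exact ht0n hk')]
    · rw [if_neg hk']
      by_cases hk0 : k = t0
      · rw [if_pos hk0, if_pos (by rw [hk0]; exact List.mem_cons_self), hk0]
      · rw [if_neg hk0, if_neg (by
          intro hmem
          rcases List.mem_cons.mp hmem with h | h
          · exact hk0 h
          · exact hk' h)]

-- a bounded filter does not care how far the range extends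
theorem filter_range'_stable (p : Nat → Bool) (A B : Nat) (hAB : A ≤ B)
    (h : ∀ d, 2 + A ≤ d → p d = false) :
    (List.range' 2 B).filter p = (List.range' 2 A).filter p := by
  have hnil : List.filter p (List.range' (2 + 1 * A) (B - A)) = [] :=
    List.filter_eq_nil_iff.mpr (by
      intro a ha
      rw [List.mem_range'_1] at ha
      simp [h a (by omega)])
  rw [show B = A + (B - A) from by omega, ← List.range'_append, List.filter_append, hnil,
    List.append_nil]

theorem foldl_min_map (f : Nat → Int) (l : List Nat) (init : Int) :
    l.foldl (fun b t => min b (f t)) init = (l.map f).foldl min init := by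
  induction l generalizing init with
  | nil => rfl
  | cons x t ih =>
    simp only [List.foldl_cons, List.map_cons]
    exact ih (min init (f x))

theorem foldl_ite_lt_min (f : Nat → Int) (l : List Nat) (init : Int) :
    l.foldl (fun b t => if f t < b then f t else b) init = (l.map f).foldl min init := by
  rw [PySem.List.foldl_congr_mem _ _ (fun b t => min b (f t)) _
    (by intro b x _; rw [ite_lt_eq_min])]
  exact foldl_min_map f l init

-- ---------- B's blocked divisor sieve ----------

-- proof-side names for the pieces of B's block loop (definitionally the port's lambdas)
def pullStep (divs : List (List Int)) (lo : Int) (next_val : List Int) (n : Int) : List Int :=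
  let best := PySem.List.pyGetD next_val (n - 1) 0 + 1
  let best := (PySem.List.pyGetD divs (n - lo) []).foldl (fun best d =>
    let cand := PySem.List.pyGetD next_val (PySem.Int.floordiv n d) 0 + 1
    if cand < best then cand else best) best
  PySem.List.pySetD next_val n best

def blockSieve (s lo hi : Int) : List (List Int) :=
  (PySem.List.pyRange 2 (s + 1) 1).foldl
    (fun divs d =>
      let start := d * d
      let start := if start < lo then PySem.Int.floordiv (lo + d - 1) d * d else start
      (PySem.List.pyRange start hi d).foldl
        (fun divs m =>
          PySem.List.pySetD divs (m - lo) (PySem.List.pyGetD divs (m - lo) [] ++ [d])) divs)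
    (List.replicate (hi - lo).toNat [])

def blockStep (targ_max s : Int) (next_val : List Int) (lo : Int) : List Int :=
  (PySem.List.pyRange lo (min (lo + 65536) (targ_max + 1)) 1).foldl
    (pullStep (blockSieve s lo (min (lo + 65536) (targ_max + 1))) lo) next_val

theorem coreB_as_fold (targ_max : Int) :
    setup_struct_alt_core targ_max
      = (PySem.List.pyRange 3 (targ_max + 1) 65536).foldl
          (blockStep targ_max (isqrtGo targ_max 1)) (init0 targ_max) := rfl

theorem isqrtGo_spec (tm : Int) : ∀ (n : Nat) (s : Int), (tm - s).toNat = n → 1 ≤ s → s * s ≤ tm →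
    1 ≤ isqrtGo tm s ∧ isqrtGo tm s * isqrtGo tm s ≤ tm ∧
      tm < (isqrtGo tm s + 1) * (isqrtGo tm s + 1) := by
  intro n
  induction n using Nat.strong_induction_on with
  | _ n ih =>
    intro s hn h1 h2
    by_cases h : (s + 1) * (s + 1) ≤ tm
    · rw [isqrtGo, dif_pos h]
      have hkey : s < tm := by nlinarith [mul_self_nonneg (s + 1)]
      exact ih ((tm - (s + 1)).toNat) (by omega) (s + 1) rfl (by omega) h
    · rw [isqrtGo, dif_neg h]
      exact ⟨h1, h2, by omega⟩

-- how many elements range(a, b, st) holds: q < count ↔ a + st*q < b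
theorem range_count (a b st : Int) (hst : 0 < st) (q : Nat) :
    q < (if a < b then ((b - a + st - 1) / st).toNat else 0) ↔ a + st * (q : Int) < b := by
  by_cases hab : a < b
  · rw [if_pos hab]
    have hexp : ((q : Int) + 1) * st = (q : Int) * st + st := by ring
    have hcomm : (q : Int) * st = st * (q : Int) := by ring
    constructor
    · intro h
      have h1 : (q : Int) < (b - a + st - 1) / st := Int.lt_toNat.mp h
      have h2 : ((q : Int) + 1) * st ≤ b - a + st - 1 :=
        (Int.le_ediv_iff_mul_le hst).mp (by omega)
      omega
    · intro h
      apply Int.lt_toNat.mpr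
      have h2 : ((q : Int) + 1) * st ≤ b - a + st - 1 := by omega
      have := (Int.le_ediv_iff_mul_le hst).mpr h2
      omega
  · rw [if_neg hab]
    constructor
    · omega
    · intro h
      exfalso
      have : (0 : Int) ≤ st * (q : Int) := by positivity
      omega

-- divisor list B precomputes for each k: all d with 2 ≤ d ≤ S, d ∣ k, d*d ≤ k (ascending)
def DV (S k : Nat) : List Int :=
  ((List.range' 2 (S - 1)).filter (fun d => decide (d ∣ k ∧ d * d ≤ k))).map
    (fun d => ((d : Nat) : Int))

-- the start index of the inner sieve loop: least multiple of d that is ≥ d*d and ≥ lo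
def startN (d lo : Nat) : Nat := if d * d < lo then ((lo + d - 1) / d) * d else d * d

theorem ceil_lo (lo d : Nat) (hd : 0 < d) : lo ≤ ((lo + d - 1) / d) * d := by
  have h1 := Nat.div_add_mod (lo + d - 1) d
  have h2 : (lo + d - 1) % d < d := Nat.mod_lt _ hd
  have h3 : d * ((lo + d - 1) / d) = ((lo + d - 1) / d) * d := Nat.mul_comm _ _
  omega

theorem startN_dvd (d lo : Nat) : d ∣ startN d lo := by
  unfold startN
  split_ifs
  · exact dvd_mul_left d _
  · exact dvd_mul_right d d

theorem startN_sq_le (d lo : Nat) (hd : 0 < d) : d * d ≤ startN d lo := by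
  unfold startN
  split_ifs with h
  · have := ceil_lo lo d hd
    omega
  · exact le_refl _

theorem startN_lo_le (d lo : Nat) (hd : 0 < d) : lo ≤ startN d lo := by
  unfold startN
  split_ifs with h
  · exact ceil_lo lo d hd
  · omega

theorem startN_min (d lo k : Nat) (hd : 0 < d) (hdvd : d ∣ k) (hsq : d * d ≤ k) (hlo : lo ≤ k) :
    startN d lo ≤ k := by
  obtain ⟨c, rfl⟩ := hdvd
  unfold startN
  split_ifs with h
  · have hdiv : (d * c + d - 1) / d = c := by
      have h0 : d * c + d - 1 = (d - 1) + d * c := by omega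
      rw [h0, Nat.add_mul_div_left _ _ hd, Nat.div_eq_of_lt (by omega)]
      omega
    have hle : (lo + d - 1) / d ≤ (d * c + d - 1) / d := Nat.div_le_div_right (by omega)
    have h1 : ((lo + d - 1) / d) * d ≤ c * d :=
      le_of_le_of_eq (Nat.mul_le_mul_right _ (le_of_le_of_eq hle hdiv)) rfl
    have hcm : c * d = d * c := Nat.mul_comm _ _
    omega
  · exact hsq

-- the two divisor enumerations agree
theorem DV_eq (S M k : Nat) (h3 : 3 ≤ k) (hkM : k ≤ M) (hS1 : 1 ≤ S)
    (hSM : M < (S + 1) * (S + 1)) :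
    ((List.range' 2 (S - 1)).filter (fun d => decide (d ∣ k ∧ d * d ≤ k)))
      = ((List.range' 2 (k - 2)).filter (fun d => decide (k % d = 0 ∧ d * d ≤ k))) := by
  have hpq : ∀ C, (List.range' 2 C).filter (fun d => decide (d ∣ k ∧ d * d ≤ k))
      = (List.range' 2 C).filter (fun d => decide (k % d = 0 ∧ d * d ≤ k)) := by
    intro C
    apply List.filter_congr
    intro d _
    apply decide_eq_decide.mpr
    exact and_congr_left (fun _ => ⟨Nat.mod_eq_zero_of_dvd, Nat.dvd_of_mod_eq_zero⟩)
  have h1 : ∀ d, 2 + (S - 1) ≤ d → (decide (k % d = 0 ∧ d * d ≤ k) : Bool) = false := by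
    intro d hd
    rw [decide_eq_false_iff_not]
    rintro ⟨_, hsq⟩
    have : (S + 1) * (S + 1) ≤ d * d := Nat.mul_le_mul (by omega) (by omega)
    omega
  have h2 : ∀ d, 2 + (k - 2) ≤ d → (decide (k % d = 0 ∧ d * d ≤ k) : Bool) = false := by
    intro d hd
    rw [decide_eq_false_iff_not]
    rintro ⟨_, hsq⟩
    have : 2 * d ≤ d * d := Nat.mul_le_mul_right d (by omega)
    omega
  calc (List.range' 2 (S - 1)).filter (fun d => decide (d ∣ k ∧ d * d ≤ k))
      = (List.range' 2 (S - 1)).filter (fun d => decide (k % d = 0 ∧ d * d ≤ k)) := hpq _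
    _ = (List.range' 2 (max (S - 1) (k - 2))).filter
          (fun d => decide (k % d = 0 ∧ d * d ≤ k)) :=
        (filter_range'_stable _ (S - 1) _ (le_max_left _ _) h1).symm
    _ = (List.range' 2 (k - 2)).filter (fun d => decide (k % d = 0 ∧ d * d ≤ k)) :=
        filter_range'_stable _ (k - 2) _ (le_max_right _ _) h2

-- the whole block sieve, outer loop over the d's
theorem blockSieve_outer (lo hi : Nat) (hlo3 : 3 ≤ lo) :
    ∀ (Ld : List Nat) (g : Nat → List Int), (∀ d ∈ Ld, 2 ≤ d) →
    Ld.foldl (fun divs (dn : Nat) =>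
        (PySem.List.pyRange
            (if ((dn : Nat) : Int) * ((dn : Nat) : Int) < ((lo : Nat) : Int) then
              PySem.Int.floordiv (((lo : Nat) : Int) + ((dn : Nat) : Int) - 1) ((dn : Nat) : Int)
                * ((dn : Nat) : Int)
            else ((dn : Nat) : Int) * ((dn : Nat) : Int))
            ((hi : Nat) : Int) ((dn : Nat) : Int)).foldl
          (fun divs m =>
            PySem.List.pySetD divs (m - ((lo : Nat) : Int))
              (PySem.List.pyGetD divs (m - ((lo : Nat) : Int)) [] ++ [((dn : Nat) : Int)])) divs)
      (tab (hi - lo) g)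
    = tab (hi - lo) (fun j =>
        g j ++ ((Ld.filter (fun d => decide (d ∣ (lo + j) ∧ d * d ≤ lo + j))).map
          (fun d => ((d : Nat) : Int)))) := by
  intro Ld
  induction Ld with
  | nil =>
    intro g _
    exact tab_congr _ _ _ (fun k _ => by simp)
  | cons d Ld' ih =>
    intro g hge
    have hd2 : 2 ≤ d := hge d List.mem_cons_self
    have hd0 : (0 : Int) < (d : Int) := by exact_mod_cast (by omega : 0 < d)
    have hslo := startN_lo_le d lo (by omega)
    have hssq := startN_sq_le d lo (by omega)
    obtain ⟨c0, hc0⟩ := startN_dvd d lo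
    have hstart : (if ((d : Nat) : Int) * ((d : Nat) : Int) < ((lo : Nat) : Int) then
          PySem.Int.floordiv (((lo : Nat) : Int) + ((d : Nat) : Int) - 1) ((d : Nat) : Int)
            * ((d : Nat) : Int)
        else ((d : Nat) : Int) * ((d : Nat) : Int)) = ((startN d lo : Nat) : Int) := by
      unfold startN
      have hlodI : (((lo : Nat) : Int) + ((d : Nat) : Int) - 1) = ((lo + d - 1 : Nat) : Int) := by
        push_cast; omega
      by_cases hc : d * d < lo
      · rw [if_pos (by exact_mod_cast (by push_cast; exact_mod_cast hc : ((d * d : Nat) : Int) < ((lo : Nat) : Int))), if_pos hc,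
          hlodI, PySem.Int.floordiv_natCast]
        push_cast; ring
      · rw [if_neg (by
            intro hcon
            apply hc
            have : ((d * d : Nat) : Int) < ((lo : Nat) : Int) := by push_cast; exact hcon
            exact_mod_cast this), if_neg hc]
        push_cast; ring
    rw [List.foldl_cons, hstart]
    -- the inner fold
    have hcnt := fun q => range_count ((startN d lo : Nat) : Int) ((hi : Nat) : Int)
      ((d : Nat) : Int) hd0 q
    have hinner :
        (PySem.List.pyRange ((startN d lo : Nat) : Int) ((hi : Nat) : Int) ((d : Nat) : Int)).foldl
          (fun divs m =>
            PySem.List.pySetD divs (m - ((lo : Nat) : Int))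
              (PySem.List.pyGetD divs (m - ((lo : Nat) : Int)) [] ++ [((d : Nat) : Int)]))
          (tab (hi - lo) g)
        = tab (hi - lo) (fun j =>
            if j ∈ (List.range (if ((startN d lo : Nat) : Int) < ((hi : Nat) : Int) then
                  ((((hi : Nat) : Int) - ((startN d lo : Nat) : Int) + ((d : Nat) : Int) - 1)
                    / ((d : Nat) : Int)).toNat
                else 0)).map (fun q => startN d lo + d * q - lo)
            then g j ++ [((d : Nat) : Int)] else g j) := by
      rw [PySem.List.pyRange_of_pos _ _ hd0, List.foldl_map]
      rw [PySem.List.foldl_congr_mem _ _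
        (fun divs (q : Nat) =>
          PySem.List.pySetD divs (((startN d lo + d * q - lo : Nat)) : Int)
            (PySem.List.pyGetD divs (((startN d lo + d * q - lo : Nat)) : Int) []
              ++ [((d : Nat) : Int)])) _
        (by
          intro acc x _
          beta_reduce
          have hc1 : ((d * x : Nat) : Int) = ((d : Nat) : Int) * ((x : Nat) : Int) := by
            push_cast; ring
          rw [show ((startN d lo : Nat) : Int) + ((d : Nat) : Int) * ((x : Nat) : Int)
              - ((lo : Nat) : Int) = ((startN d lo + d * x - lo : Nat) : Int) from by omega])]
      rw [← List.foldl_map (f := fun q => startN d lo + d * q - lo)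
        (g := fun divs (t : Nat) =>
          PySem.List.pySetD divs ((t : Nat) : Int)
            (PySem.List.pyGetD divs ((t : Nat) : Int) [] ++ [((d : Nat) : Int)]))]
      exact sieve_upd (hi - lo) ((d : Nat) : Int) _ g
        (List.Nodup.map (fun a b hab => by
          have h1 : startN d lo + d * a - lo = startN d lo + d * b - lo := hab
          exact Nat.eq_of_mul_eq_mul_left (show 0 < d by omega)
            (show d * a = d * b by omega)) List.nodup_range)
        (by
          intro t ht
          rw [List.mem_map] at ht
          obtain ⟨q, hq, rfl⟩ := ht
          have h1 := (hcnt q).mp (List.mem_range.mp hq)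
          have hc1 : ((d * q : Nat) : Int) = ((d : Nat) : Int) * ((q : Nat) : Int) := by
            push_cast; ring
          omega)
    rw [hinner, ih _ (fun d' hd' => hge d' (List.mem_cons_of_mem _ hd'))]
    apply tab_congr; intro j hj
    have hmemT : (j ∈ (List.range (if ((startN d lo : Nat) : Int) < ((hi : Nat) : Int) then
          ((((hi : Nat) : Int) - ((startN d lo : Nat) : Int) + ((d : Nat) : Int) - 1)
            / ((d : Nat) : Int)).toNat
        else 0)).map (fun q => startN d lo + d * q - lo))
        ↔ (d ∣ (lo + j) ∧ d * d ≤ lo + j) := by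
      rw [List.mem_map]
      constructor
      · rintro ⟨q, hq, rfl⟩
        have h1 := (hcnt q).mp (List.mem_range.mp hq)
        constructor
        · exact ⟨c0 + q, by rw [show lo + (startN d lo + d * q - lo) = startN d lo + d * q
            from by omega, hc0]; ring⟩
        · omega
      · rintro ⟨hdvd, hsq⟩
        have hmin : startN d lo ≤ lo + j :=
          startN_min d lo (lo + j) (by omega) hdvd hsq (by omega)
        obtain ⟨c, hc⟩ := hdvd
        have hc0c : c0 ≤ c := by
          have : d * c0 ≤ d * c := by omega
          exact Nat.le_of_mul_le_mul_left this (by omega)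
        refine ⟨c - c0, List.mem_range.mpr ((hcnt (c - c0)).mpr ?_), ?_⟩
        · have hc2 : d * (c - c0) + d * c0 = d * c := by
            rw [← Nat.mul_add, Nat.sub_add_cancel hc0c]
          have hcast : ((d * (c - c0) : Nat) : Int)
              = ((d : Nat) : Int) * (((c - c0 : Nat)) : Int) := by push_cast; ring
          omega
        · have hc2 : d * (c - c0) + d * c0 = d * c := by
            rw [← Nat.mul_add, Nat.sub_add_cancel hc0c]
          omega
    by_cases hc : d ∣ (lo + j) ∧ d * d ≤ lo + j
    · rw [if_pos (hmemT.mpr hc), List.filter_cons, if_pos (by simpa using hc)]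
      simp only [List.map_cons]
      rw [List.append_assoc]
      rfl
    · rw [if_neg (fun hmem => hc (hmemT.mp hmem)), List.filter_cons,
        if_neg (by simpa using hc)]

theorem blockSieve_eq (S lo hi : Nat) (hlo3 : 3 ≤ lo) (hlohi : lo ≤ hi) (hS1 : 1 ≤ S) :
    blockSieve ((S : Int)) ((lo : Int)) ((hi : Int))
      = tab (hi - lo) (fun j =>
          ((List.range' 2 (S - 1)).filter
            (fun d => decide (d ∣ (lo + j) ∧ d * d ≤ lo + j))).map (fun d => ((d : Nat) : Int))) := by
  unfold blockSieve
  rw [show (((hi : Nat) : Int) - ((lo : Nat) : Int)).toNat = hi - lo from by omega, replicate_tab]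
  rw [show ((S : Nat) : Int) + 1 = ((S + 1 : Nat) : Int) from by push_cast; ring, foldl_pyRange_two,
    show (((S + 1 : Nat) : Int) - 2).toNat = S - 1 from by omega]
  rw [blockSieve_outer lo hi hlo3 (List.range' 2 (S - 1)) (fun _ => [])
    (fun d hd => (List.mem_range'_1.mp hd).1)]
  exact tab_congr _ _ _ (fun j _ => by simp)

theorem pullStep_eq (M S lo hi t : Nat) (h2 : 2 ≤ t) (htM : t < M)
    (hS1 : 1 ≤ S) (hSM : M < (S + 1) * (S + 1))
    (hlo3 : 3 ≤ lo) (hlon : lo ≤ t + 1) (hnhi : t + 1 < hi) (hhiM : hi ≤ M + 1) :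
    pullStep (tab (hi - lo) (fun j =>
        ((List.range' 2 (S - 1)).filter
          (fun d => decide (d ∣ (lo + j) ∧ d * d ≤ lo + j))).map (fun d => ((d : Nat) : Int))))
      ((lo : Int)) (tab (M + 2) (FB M t)) (((t + 1 : Nat) : Int))
      = tab (M + 2) (FB M (t + 1)) := by
  obtain ⟨p, rfl⟩ : ∃ p, t = p + 2 := ⟨t - 2, by omega⟩
  rw [show p + 2 + 1 = p + 3 from by omega] at *
  simp only [pullStep]
  rw [show (((p + 3 : Nat)) : Int) - 1 = ((p + 2 : Nat) : Int) from by push_cast; ring]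
  rw [PySem.List.pyGetD_natCast, tab_getD _ _ _ _ (by omega : p + 2 < M + 2)]
  rw [show FB M (p + 2) (p + 2) = V (p + 2) from by simp [FB]]
  rw [show (((p + 3 : Nat)) : Int) - ((lo : Nat) : Int) = ((p + 3 - lo : Nat) : Int) from by
    push_cast; omega]
  rw [PySem.List.pyGetD_natCast, tab_getD _ _ _ _ (by omega : p + 3 - lo < hi - lo)]
  rw [show lo + (p + 3 - lo) = p + 3 from by omega]
  rw [DV_eq S M (p + 3) (by omega) (by omega) hS1 hSM, show p + 3 - 2 = p + 1 from by omega,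
    List.foldl_map]
  rw [PySem.List.foldl_congr_mem _ _
    (fun b (dn : Nat) => if V ((p + 3) / dn) + 1 < b then V ((p + 3) / dn) + 1 else b) _
    (by
      intro b dn hdn
      have hmem := List.mem_filter.mp hdn
      have hdn2 : 2 ≤ dn := (List.mem_range'_1.mp hmem.1).1
      have hdle : (p + 3) / dn ≤ p + 2 := by
        have := Nat.div_lt_self (show 0 < p + 3 by omega) (show 1 < dn by omega)
        omega
      beta_reduce
      rw [PySem.Int.floordiv_natCast, PySem.List.pyGetD_natCast,
        tab_getD _ _ _ _ (by omega : (p + 3) / dn < M + 2),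
        show FB M (p + 2) ((p + 3) / dn) = V ((p + 3) / dn) from by simp [FB, hdle]])]
  rw [foldl_ite_lt_min (fun dn => V ((p + 3) / dn) + 1)]
  rw [show (((List.range' 2 (p + 1)).filter
        (fun d => decide ((p + 3) % d = 0 ∧ d * d ≤ p + 3))).map
        (fun dn => V ((p + 3) / dn) + 1)).foldl min (V (p + 2) + 1) = V (p + 3) from by
    rw [V_succ p, foldl_ite_min (fun d => (p + 3) % d = 0 ∧ d * d ≤ p + 3)
      (fun d => V ((p + 3) / d) + 1)]]
  rw [PySem.List.pySetD_natCast, tab_set _ _ _ _ (show p + 3 < M + 2 by omega)]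
  apply tab_congr
  intro k hk
  by_cases hke : k = p + 3
  · rw [if_pos hke]
    subst hke
    rw [show FB M (p + 3) (p + 3) = V (p + 3) from by simp [FB]]
  · rw [if_neg hke]
    unfold FB
    split_ifs <;> first | rfl | omega

theorem blockPull (M S lo hi : Nat) (hS1 : 1 ≤ S) (hSM : M < (S + 1) * (S + 1))
    (hlo3 : 3 ≤ lo) (hhiM : hi ≤ M + 1) :
    ∀ (cnt t : Nat), 2 ≤ t → lo ≤ t + 1 → t + cnt = hi - 1 →
    (List.range' (t + 1) cnt).foldl
        (fun st (j : Nat) => pullStep (tab (hi - lo) (fun j =>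
            ((List.range' 2 (S - 1)).filter
              (fun d => decide (d ∣ (lo + j) ∧ d * d ≤ lo + j))).map (fun d => ((d : Nat) : Int))))
          ((lo : Int)) st ((j : Nat) : Int)) (tab (M + 2) (FB M t))
      = tab (M + 2) (FB M (hi - 1)) := by
  intro cnt
  induction cnt with
  | zero =>
    intro t h2 hlon he
    obtain rfl : t = hi - 1 := by omega
    rfl
  | succ c ih =>
    intro t h2 hlon he
    rw [List.range'_succ, List.foldl_cons,
      pullStep_eq M S lo hi t h2 (by omega) hS1 hSM hlo3 hlon (by omega) hhiM]
    exact ih (t + 1) (by omega) (by omega) (by omega)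

theorem blockStep_eq (M S lo : Nat) (hM : 2 ≤ M) (hS1 : 1 ≤ S) (hSM : M < (S + 1) * (S + 1))
    (hlo3 : 3 ≤ lo) (hloM : lo ≤ M) :
    blockStep ((M : Int)) ((S : Int)) (tab (M + 2) (FB M (lo - 1))) ((lo : Int))
      = tab (M + 2) (FB M (min (lo + 65536) (M + 1) - 1)) := by
  unfold blockStep
  rw [show min (((lo : Nat) : Int) + 65536) (((M : Nat) : Int) + 1)
      = ((min (lo + 65536) (M + 1) : Nat) : Int) from by push_cast; omega]
  rw [blockSieve_eq S lo (min (lo + 65536) (M + 1)) hlo3 (by omega) hS1]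
  rw [foldl_pyRange_natCast,
    show (((min (lo + 65536) (M + 1) : Nat) : Int) - ((lo : Nat) : Int)).toNat
      = min (lo + 65536) (M + 1) - lo from by omega]
  rw [show List.range' lo (min (lo + 65536) (M + 1) - lo)
    = List.range' ((lo - 1) + 1) (min (lo + 65536) (M + 1) - lo) from by rw [Nat.sub_add_cancel (by omega)]]
  exact blockPull M S lo (min (lo + 65536) (M + 1)) hS1 hSM hlo3 (by omega)
    (min (lo + 65536) (M + 1) - lo) (lo - 1) (by omega) (by omega) (by omega)


theorem coreB_eq (M : Nat) (hM : 2 ≤ M) :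
    setup_struct_alt_core ((M : Int)) = tab (M + 2) (FB M M) := by
  obtain ⟨hr1, hrle, hrgt⟩ :=
    isqrtGo_spec ((M : Int)) (((M : Int) - 1).toNat) 1 rfl (by omega) (by omega)
  have hcast : isqrtGo ((M : Int)) 1 = (((isqrtGo ((M : Int)) 1).toNat : Nat) : Int) := by omega
  set S := (isqrtGo ((M : Int)) 1).toNat with hS
  have hS1 : 1 ≤ S := by omega
  have hSgt : M < (S + 1) * (S + 1) := by
    have h := hrgt
    rw [hcast] at h
    exact_mod_cast h
  rw [coreB_as_fold, hcast, init0_tab M (by omega)]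
  rw [PySem.List.pyRange_of_pos 3 ((M : Int) + 1) (by norm_num : (0 : Int) < 65536),
    List.foldl_map]
  have hBC := fun q => range_count 3 ((M : Int) + 1) 65536 (by norm_num) q
  rw [tab_congr (M + 2) (f0 M) (FB M 2) (by
    intro k hk
    unfold f0 FB
    rcases Nat.lt_or_ge k 3 with h | h
    · interval_cases k <;> simp [V_zero, V_one, V_two]
    · rw [if_neg (by omega), if_neg (by omega), if_neg (by omega), if_neg (by omega)])]
  have hloop : ∀ c : Nat,
      c ≤ (if (3 : Int) < (M : Int) + 1 then
        (((M : Int) + 1 - 3 + 65536 - 1) / 65536).toNat else 0) →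
      List.foldl
          (fun st (b : Nat) => blockStep ((M : Int)) ((S : Nat) : Int) st
            ((3 : Int) + 65536 * ((b : Nat) : Int)))
          (tab (M + 2) (FB M 2)) (List.range c)
        = tab (M + 2) (FB M (min (3 + 65536 * c) (M + 1) - 1)) := by
    intro c
    induction c with
    | zero =>
      intro _
      rw [show min (3 + 65536 * 0) (M + 1) - 1 = 2 from by omega]
      rfl
    | succ c ih =>
      intro hc
      rw [List.range_succ, List.foldl_append, ih (by omega), List.foldl_cons, List.foldl_nil]
      have hcastc : ((3 + 65536 * c : Nat) : Int) = 3 + 65536 * ((c : Nat) : Int) := by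
        push_cast; ring
      have hlo : 3 + 65536 * c < M + 1 := by
        have h1 := (hBC c).mp (by omega)
        omega
      rw [show (3 : Int) + 65536 * ((c : Nat) : Int) = ((3 + 65536 * c : Nat) : Int) from by
        push_cast; ring]
      rw [show min (3 + 65536 * c) (M + 1) - 1 = (3 + 65536 * c) - 1 from by omega]
      rw [blockStep_eq M S (3 + 65536 * c) hM hS1 hSgt (by omega) (by omega)]
      rw [show min (3 + 65536 * c + 65536) (M + 1) = min (3 + 65536 * (c + 1)) (M + 1) from by
        have : 65536 * (c + 1) = 65536 * c + 65536 := by ring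
        omega]
  have hfin : min (3 + 65536 * (if (3 : Int) < (M : Int) + 1 then
      (((M : Int) + 1 - 3 + 65536 - 1) / 65536).toNat else 0)) (M + 1) - 1 = M := by
    set BC := (if (3 : Int) < (M : Int) + 1 then
      (((M : Int) + 1 - 3 + 65536 - 1) / 65536).toNat else 0) with hBCdef
    have h2 : ¬ ((3 : Int) + 65536 * ((BC : Nat) : Int) < (M : Int) + 1) := by
      intro hcon
      have := (hBC BC).mpr hcon
      omega
    have hcastBC : ((3 + 65536 * BC : Nat) : Int) = 3 + 65536 * ((BC : Nat) : Int) := by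
      push_cast; ring
    omega
  have := hloop _ (le_refl _)
  rw [hfin] at this
  exact this


theorem core_eq_one : setup_struct_core ((1 : Nat) : Int) = setup_struct_alt_core ((1 : Nat) : Int) := by
  decide

-- ===== VERDICT (by name: the statement is the Claim_ definition above) =====
theorem setup_struct_spec : Claim_equal_setup_struct := by
  intro vm _ hPre
  obtain ⟨hne, x, hx, hx1⟩ := hPre
  unfold Spec_setup_struct setup_struct setup_struct_alt
  cases hmax : PySem.List.max? vm (fun x => x) with
  | none => rfl
  | some m =>
    have hm : 1 ≤ m := le_trans hx1 (PySem.List.max?_isMax hmax x hx)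
    obtain ⟨M, rfl⟩ : ∃ M : Nat, m = (M : Int) := ⟨m.toNat, by omega⟩
    have hM1 : 1 ≤ M := by exact_mod_cast hm
    show setup_struct_core ((M : Int)) = setup_struct_alt_core ((M : Int))
    rcases Nat.lt_or_ge M 2 with h | h
    · obtain rfl : M = 1 := by omega
      exact core_eq_one
    · rw [coreA_eq M h, coreB_eq M h]
      exact tab_congr _ _ _ (fun k _ => by by_cases hk : k ≤ M <;> simp [FA, FB, hk])
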